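-- pv_equiv track=rewrite | github.com/S1rt3ge/code-review-agent | backend/services/analyzer.py | _build_comment_body
-- ===== SOURCE A (Python) =====
-- SEVERITY_ORDER = ["critical", "high", "medium", "low", "info"]
--
-- SEVERITY_EMOJI: dict[str, str] = {
--     "critical": "🔴",
--     "high": "🟠",
--     "medium": "🟡",
--     "low": "🔵",
--     "info": "⚪",
-- }
--
-- def _build_comment_body(findings: list[dict]) -> str:
--     """Format a list of findings into a GitHub markdown PR comment.
--
--     Findings are grouped by severity (critical first) and then by file.
--
--     Args:
--         findings: List of finding dicts with at minimum:
--             ``severity``, ``file_path``, ``line_number``,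
--             ``message``, ``agent_name``, ``finding_type``.
--
--     Returns:
--         Markdown string suitable for a GitHub PR comment body.
--     """
--     if not findings:
--         return "## Code Review\n\n✅ No issues found."
--
--     lines: list[str] = ["## Code Review\n"]
--
--     # Group by severity
--     by_severity: dict[str, list[dict]] = {}
--     for f in findings:
--         sev = f.get("severity", "info").lower()
--         by_severity.setdefault(sev, []).append(f)
--
--     for sev in SEVERITY_ORDER:
--         group = by_severity.get(sev, [])
--         if not group:
--             continue
--         emoji = SEVERITY_EMOJI.get(sev, "•")
--         lines.append(f"### {emoji} {sev.capitalize()} ({len(group)})\n")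
--
--         for f in group:
--             file_path = f.get("file_path", "unknown")
--             line_no = f.get("line_number", 0)
--             agent = f.get("agent_name", "agent")
--             ftype = f.get("finding_type", "issue")
--             message = f.get("message", "")
--             suggestion = f.get("suggestion", "")
--             snippet = f.get("code_snippet", "")
--
--             lines.append(f"**`{file_path}:{line_no}`** [{agent}/{ftype}]")
--             lines.append(f"> {message}")
--             if suggestion:
--                 lines.append(f"\n💡 {suggestion}")
--             if snippet:
--                 lines.append(f"\n```\n{snippet}\n```")
--             lines.append("")
--
--     total = len(findings)
--     lines.append(f"\n---\n*{total} finding{'s' if total != 1 else ''} total*")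
--     return "\n".join(lines)
-- ===== SOURCE B (Python) =====
-- SEVERITY_ORDER = ["critical", "high", "medium", "low", "info"]
--
-- SEVERITY_EMOJI: dict[str, str] = {
--     "critical": "🔴",
--     "high": "🟠",
--     "medium": "🟡",
--     "low": "🔵",
--     "info": "⚪",
-- }
--
--
-- def _finding_lines(f):
--     out = [
--         f"**`{f.get('file_path', 'unknown')}:{f.get('line_number', 0)}`** "
--         f"[{f.get('agent_name', 'agent')}/{f.get('finding_type', 'issue')}]",
--         f"> {f.get('message', '')}",
--     ]
--     if f.get("suggestion", ""):
--         out.append(f"\n💡 {f.get('suggestion', '')}")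
--     if f.get("code_snippet", ""):
--         out.append(f"\n```\n{f.get('code_snippet', '')}\n```")
--     out.append("")
--     return out
--
--
-- def _build_comment_body(findings):
--     if not findings:
--         return "## Code Review\n\n✅ No issues found."
--     lines = ["## Code Review\n"]
--     for sev in SEVERITY_ORDER:
--         group = [f for f in findings if f.get("severity", "info").lower() == sev]
--         if not group:
--             continue
--         lines.append(f"### {SEVERITY_EMOJI.get(sev, '•')} {sev.capitalize()} ({len(group)})\n")
--         lines.extend(line for f in group for line in _finding_lines(f))
--     total = len(findings)
--     lines.append(f"\n---\n*{total} finding{'s' if total != 1 else ''} total*")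
--     return "\n".join(lines)
-- ===== Notes on version B (the rewrite author's own statement) =====
-- stated objective: simpler
-- what changed: Drops the by_severity grouping dict entirely: B loops over SEVERITY_ORDER and rebuilds each group by filtering findings, and emits each finding's lines via a helper list instead of inline appends.
import Mathlib
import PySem

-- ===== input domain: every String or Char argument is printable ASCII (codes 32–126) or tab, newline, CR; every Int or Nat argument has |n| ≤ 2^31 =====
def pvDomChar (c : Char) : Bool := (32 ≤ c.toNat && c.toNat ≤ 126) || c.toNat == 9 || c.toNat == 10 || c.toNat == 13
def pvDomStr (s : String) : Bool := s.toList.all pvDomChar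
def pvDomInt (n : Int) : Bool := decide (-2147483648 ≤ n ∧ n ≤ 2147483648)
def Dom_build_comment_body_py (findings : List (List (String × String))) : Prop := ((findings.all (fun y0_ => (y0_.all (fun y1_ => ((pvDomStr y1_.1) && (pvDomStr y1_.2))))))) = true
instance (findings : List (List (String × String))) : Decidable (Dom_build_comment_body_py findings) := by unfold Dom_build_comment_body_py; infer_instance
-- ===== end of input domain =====

-- B drops A's by_severity grouping dict: it re-filters findings per severity and emits each
-- finding's lines through a helper; same return value, return-value equivalence proved below.

-- module constants shared by A and B
def SEVERITY_ORDER : List String := ["critical", "high", "medium", "low", "info"]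

def SEVERITY_EMOJI : PySem.Dict String String :=
  PySem.Dict.mk [("critical", "🔴"), ("high", "🟠"), ("medium", "🟡"), ("low", "🔵"), ("info", "⚪")]

-- sev.capitalize(): first char uppercased, the rest lowercased (exact on ASCII)
def pyCapitalize (s : String) : String :=
  match s.toList with
  | [] => ""
  | c :: rest => String.ofList (PySem.Chars.upperChar c :: PySem.Chars.lower rest)

-- f.get("severity", "info").lower()  (appears verbatim in both A and B)
def pvSevOf (f : List (String × String)) : String :=
  PySem.Str.lower ((PySem.Dict.mk f).getD "severity" "info")

-- ===== PORT A =====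
def build_comment_body_py (findings : List (List (String × String))) : String :=
  if findings.isEmpty then "## Code Review\n\n✅ No issues found."
  else
    let lines : List String := ["## Code Review\n"]
    -- by_severity.setdefault(sev, []).append(f)  ==  d[sev] = d.get(sev, []) + [f]
    let by_severity : PySem.Dict String (List (List (String × String))) :=
      findings.foldl (fun d f => d.modify (pvSevOf f) [] (· ++ [f])) PySem.Dict.empty
    let lines := SEVERITY_ORDER.foldl (fun lines sev =>
      let group := by_severity.getD sev []
      if group.isEmpty then lines
      else
        let emoji := SEVERITY_EMOJI.getD sev "•"
        let lines := lines ++ ["### " ++ emoji ++ " " ++ pyCapitalize sev ++ " (" ++ PySem.Int.toStr (group.length : Int) ++ ")\n"]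
        group.foldl (fun lines f =>
          let d := PySem.Dict.mk f
          let file_path := d.getD "file_path" "unknown"
          let line_no := d.getD "line_number" "0"  -- f.get("line_number", 0): str default renders "0"
          let agent := d.getD "agent_name" "agent"
          let ftype := d.getD "finding_type" "issue"
          let message := d.getD "message" ""
          let suggestion := d.getD "suggestion" ""
          let snippet := d.getD "code_snippet" ""
          let lines := lines ++ ["**`" ++ file_path ++ ":" ++ line_no ++ "`** [" ++ agent ++ "/" ++ ftype ++ "]"]
          let lines := lines ++ ["> " ++ message]
          let lines := if suggestion ≠ "" then lines ++ ["\n💡 " ++ suggestion] else lines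
          let lines := if snippet ≠ "" then lines ++ ["\n```\n" ++ snippet ++ "\n```"] else lines
          lines ++ [""]) lines) lines
    let total : Int := (findings.length : Int)
    PySem.Str.join "\n" (lines ++ ["\n---\n*" ++ PySem.Int.toStr total ++ " finding" ++ (if total ≠ 1 then "s" else "") ++ " total*"])

-- ===== PORT B =====
def pvFindingLines (f : List (String × String)) : List String :=
  let d := PySem.Dict.mk f
  let out := ["**`" ++ d.getD "file_path" "unknown" ++ ":" ++ d.getD "line_number" "0" ++ "`** [" ++ d.getD "agent_name" "agent" ++ "/" ++ d.getD "finding_type" "issue" ++ "]",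
              "> " ++ d.getD "message" ""]
  let out := if d.getD "suggestion" "" ≠ "" then out ++ ["\n💡 " ++ d.getD "suggestion" ""] else out
  let out := if d.getD "code_snippet" "" ≠ "" then out ++ ["\n```\n" ++ d.getD "code_snippet" "" ++ "\n```"] else out
  out ++ [""]

def build_comment_body_py_alt (findings : List (List (String × String))) : String :=
  if findings.isEmpty then "## Code Review\n\n✅ No issues found."
  else
    let lines := SEVERITY_ORDER.foldl (fun lines sev =>
      let group := findings.filter (fun f => pvSevOf f == sev)
      if group.isEmpty then lines
      else (lines ++ ["### " ++ SEVERITY_EMOJI.getD sev "•" ++ " " ++ pyCapitalize sev ++ " (" ++ PySem.Int.toStr (group.length : Int) ++ ")\n"])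
             ++ group.flatMap pvFindingLines) ["## Code Review\n"]
    let total : Int := (findings.length : Int)
    PySem.Str.join "\n" (lines ++ ["\n---\n*" ++ PySem.Int.toStr total ++ " finding" ++ (if total ≠ 1 then "s" else "") ++ " total*"])

-- ===== PRECONDITION & SPEC =====
def Spec_build_comment_body_py (findings : List (List (String × String))) (out : String) : Prop := out = build_comment_body_py_alt findings
instance (findings : List (List (String × String))) (out : String) : Decidable (Spec_build_comment_body_py findings out) := by unfold Spec_build_comment_body_py; infer_instance

-- ===== CLAIM (what is proved, stated in full; the proofs are below) =====
def Claim_equal_build_comment_body_py : Prop := ∀ (findings : List (List (String × String))), Dom_build_comment_body_py findings → Spec_build_comment_body_py findings (build_comment_body_py findings)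

-- ===== LEMMAS AND PROOFS =====

-- A's grouping dict read back at a key is exactly B's filter over the findings
lemma getD_groupLoop (fs : List (List (String × String)))
    (d : PySem.Dict String (List (List (String × String)))) (c : String) :
    (fs.foldl (fun d f => d.modify (pvSevOf f) [] (· ++ [f])) d).getD c []
      = d.getD c [] ++ fs.filter (fun f => pvSevOf f == c) := by
  induction fs generalizing d with
  | nil => simp
  | cons f fs ih =>
    simp only [List.foldl_cons, List.filter_cons, ih, PySem.Dict.getD_modify]
    by_cases h : c = pvSevOf f
    · simp [h]
    · have h' : (pvSevOf f == c) = false := by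
        simp; exact fun e => h e.symm
      simp [h, h']

-- A's inline per-finding appends produce exactly B's helper block
lemma inner_step (acc : List String) (f : List (String × String)) :
    (let d := PySem.Dict.mk f
     let file_path := d.getD "file_path" "unknown"
     let line_no := d.getD "line_number" "0"
     let agent := d.getD "agent_name" "agent"
     let ftype := d.getD "finding_type" "issue"
     let message := d.getD "message" ""
     let suggestion := d.getD "suggestion" ""
     let snippet := d.getD "code_snippet" ""
     let lines := acc ++ ["**`" ++ file_path ++ ":" ++ line_no ++ "`** [" ++ agent ++ "/" ++ ftype ++ "]"]
     let lines := lines ++ ["> " ++ message]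
     let lines := if suggestion ≠ "" then lines ++ ["\n💡 " ++ suggestion] else lines
     let lines := if snippet ≠ "" then lines ++ ["\n```\n" ++ snippet ++ "\n```"] else lines
     lines ++ [""]) = acc ++ pvFindingLines f := by
  simp only [pvFindingLines]
  split_ifs <;> simp

lemma inner_foldl (group : List (List (String × String))) (acc : List String) :
    group.foldl (fun lines f =>
          let d := PySem.Dict.mk f
          let file_path := d.getD "file_path" "unknown"
          let line_no := d.getD "line_number" "0"
          let agent := d.getD "agent_name" "agent"
          let ftype := d.getD "finding_type" "issue"
          let message := d.getD "message" ""
          let suggestion := d.getD "suggestion" ""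
          let snippet := d.getD "code_snippet" ""
          let lines := lines ++ ["**`" ++ file_path ++ ":" ++ line_no ++ "`** [" ++ agent ++ "/" ++ ftype ++ "]"]
          let lines := lines ++ ["> " ++ message]
          let lines := if suggestion ≠ "" then lines ++ ["\n💡 " ++ suggestion] else lines
          let lines := if snippet ≠ "" then lines ++ ["\n```\n" ++ snippet ++ "\n```"] else lines
          lines ++ [""]) acc = acc ++ group.flatMap pvFindingLines := by
  induction group generalizing acc with
  | nil => simp
  | cons f fs ih =>
    simp only [List.foldl_cons, List.flatMap_cons]
    rw [inner_step, ih, List.append_assoc]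

lemma foldl_ext {α β : Type} (f g : α → β → α) (h : ∀ a b, f a b = g a b)
    (init : α) (l : List β) : l.foldl f init = l.foldl g init := by
  induction l generalizing init with
  | nil => rfl
  | cons b l ih => simp only [List.foldl_cons, h, ih]

-- ===== VERDICT (by name: the statement is the Claim_ definition above) =====
theorem build_comment_body_py_spec : Claim_equal_build_comment_body_py := by
  intro findings _
  unfold Spec_build_comment_body_py build_comment_body_py build_comment_body_py_alt
  by_cases hne : findings.isEmpty
  · simp [hne]
  · simp only [hne]
    congr 1
    congr 1
    congr 1
    refine foldl_ext _ _ ?_ _ _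
    intro lines sev
    rw [getD_groupLoop, PySem.Dict.getD_empty, List.nil_append]
    by_cases hg : (findings.filter (fun f => pvSevOf f == sev)).isEmpty
    · simp [hg]
    · simp only [hg]
      rw [inner_foldl]
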